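-- pv_equiv track=rewrite | github.com/sddunham0-wq/plat_detection | utils/final_plate_detector.py | _clean_plate_text
-- ===== SOURCE A (Python) =====
-- def _clean_plate_text(text: str) -> str:
--     """
--     Clean OCR text untuk Indonesian plates
--     """
--     if not text:
--         return ""
--
--     # Remove non-alphanumeric
--     cleaned = ''.join(c for c in text.upper() if c.isalnum())
--
--     # Common OCR corrections for Indonesian plates
--     corrections = {
--         '0': 'O', '1': 'I', '5': 'S', '8': 'B', '6': 'G'
--     }
--
--     # Apply smart corrections
--     if len(cleaned) >= 4:
--         # First 1-2 characters usually letters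
--         for i in range(min(2, len(cleaned))):
--             if cleaned[i].isdigit() and cleaned[i] in corrections:
--                 cleaned = cleaned[:i] + corrections[cleaned[i]] + cleaned[i+1:]
--
--         # Last 1-3 characters usually letters
--         for i in range(max(2, len(cleaned) - 3), len(cleaned)):
--             if i < len(cleaned) and cleaned[i].isdigit() and cleaned[i] in corrections:
--                 cleaned = cleaned[:i] + corrections[cleaned[i]] + cleaned[i+1:]
--
--     return cleaned
-- ===== SOURCE B (Python) =====
-- def _clean_plate_text(text: str) -> str:
--     corrections = {'0': 'O', '1': 'I', '5': 'S', '8': 'B', '6': 'G'}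
--     cleaned = ''.join(c for c in text.upper() if c.isalnum())
--     n = len(cleaned)
--     if n < 4:
--         return cleaned
--     tail = max(2, n - 3)
--     return ''.join(corrections.get(c, c) if (i < 2 or i >= tail) else c
--                    for i, c in enumerate(cleaned))
-- ===== Notes on version B (the rewrite author's own statement) =====
-- stated objective: simpler
-- what changed: A's two correction loops that repeatedly rebuild the string by slice concatenation are merged into a single enumerate pass that applies corrections.get(c, c) exactly on the precomputed index regions (i < 2 or i >= max(2, n-3)).
import Mathlib
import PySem

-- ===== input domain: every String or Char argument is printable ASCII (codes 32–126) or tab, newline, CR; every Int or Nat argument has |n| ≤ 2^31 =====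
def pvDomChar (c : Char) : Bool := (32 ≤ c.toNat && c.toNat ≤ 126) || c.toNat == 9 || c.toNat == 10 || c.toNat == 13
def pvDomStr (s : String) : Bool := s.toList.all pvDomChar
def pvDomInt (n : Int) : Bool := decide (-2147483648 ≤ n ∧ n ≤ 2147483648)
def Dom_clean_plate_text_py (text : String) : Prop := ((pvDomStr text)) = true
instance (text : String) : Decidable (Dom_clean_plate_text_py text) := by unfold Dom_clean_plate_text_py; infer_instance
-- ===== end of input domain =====

-- B replaces A's two slice-rebuilding correction loops by a single enumerate pass over a
-- precomputed boundary (simpler decomposition, same return value).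

-- ===== PORT A =====
-- corrections = {'0': 'O', '1': 'I', '5': 'S', '8': 'B', '6': 'G'}  (same literal dict in A and B)
def pvCorrections : PySem.Dict Char Char :=
  PySem.Dict.ofList [('0','O'),('1','I'),('5','S'),('8','B'),('6','G')]

-- one iteration of A's first loop body: cleaned = cleaned[:i] + corrections[cleaned[i]] + cleaned[i+1:]
def pvFixAt (cleaned : List Char) (i : Int) : List Char :=
  match PySem.List.pyGet? cleaned i with
  | none => cleaned   -- unreachable: i is always in range where this is called
  | some c =>
    if PySem.Chars.isdigit c && pvCorrections.contains c then
      PySem.List.slice cleaned none (some i) ++ [pvCorrections.getD c c]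
        ++ PySem.List.slice cleaned (some (i+1)) none
    else cleaned

-- one iteration of A's second loop body (extra 'i < len(cleaned)' guard)
def pvFixAtGuard (cleaned : List Char) (i : Int) : List Char :=
  if i < (cleaned.length : Int) then pvFixAt cleaned i else cleaned

def clean_plate_text_py (text : String) : String :=
  if text = "" then ""
  else
    let cleaned := (PySem.Chars.upper text.toList).filter PySem.Chars.isalnum
    let cleaned :=
      if 4 ≤ cleaned.length then
        let cleaned :=
          (PySem.List.pyRange 0 (min 2 (cleaned.length : Int)) 1).foldl pvFixAt cleaned
        (PySem.List.pyRange (max 2 ((cleaned.length : Int) - 3)) (cleaned.length : Int) 1).foldl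
          pvFixAtGuard cleaned
      else cleaned
    String.mk cleaned

-- ===== PORT B =====
def clean_plate_text_py_alt (text : String) : String :=
  let cleaned := (PySem.Chars.upper text.toList).filter PySem.Chars.isalnum
  let n := cleaned.length
  if n < 4 then String.mk cleaned
  else
    let tail : Int := max 2 ((n : Int) - 3)
    String.mk ((PySem.List.enumerate cleaned).map
      (fun p => if p.1 < 2 || tail ≤ p.1 then pvCorrections.getD p.2 p.2 else p.2))

-- ===== PRECONDITION & SPEC =====
def Spec_clean_plate_text_py (text : String) (out : String) : Prop := out = clean_plate_text_py_alt text
instance (text : String) (out : String) : Decidable (Spec_clean_plate_text_py text out) := by unfold Spec_clean_plate_text_py; infer_instance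

-- ===== CLAIM (what is proved, stated in full; the proofs are below) =====
def Claim_equal_clean_plate_text_py : Prop := ∀ (text : String), Dom_clean_plate_text_py text → Spec_clean_plate_text_py text (clean_plate_text_py text)

-- ===== LEMMAS AND PROOFS =====

-- the pointwise correction A's loop bodies apply at one index
def pvFix (c : Char) : Char :=
  if PySem.Chars.isdigit c && pvCorrections.contains c then pvCorrections.getD c c else c

theorem pvCorr_mk : pvCorrections = PySem.Dict.mk [('0','O'),('1','I'),('5','S'),('8','B'),('6','G')] := by decide

-- every key of the dict is a digit, so A's isdigit-and-contains guard equals B's getD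
theorem pvFix_eq_getD (c : Char) : pvFix c = pvCorrections.getD c c := by
  simp only [pvFix, pvCorr_mk, PySem.Dict.getD, PySem.Dict.get?_mk_cons, PySem.Dict.contains,
    PySem.Chars.isdigit]
  split_ifs with h1 <;> simp_all [PySem.Dict.get?] <;>
    first
      | rfl
      | (rename_i hc; subst hc; revert h1; decide)

-- A's slice-rebuild at an in-range index is List.set with pvFix
theorem pvFixAt_eq_set (xs : List Char) (i : Int) (h0 : 0 ≤ i) (h : i.toNat < xs.length) :
    pvFixAt xs i = xs.set i.toNat (pvFix (xs[i.toNat]'h)) := by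
  obtain ⟨n, rfl⟩ : ∃ n : Nat, i = (n : Int) := ⟨i.toNat, (Int.toNat_of_nonneg h0).symm⟩
  simp only [Int.toNat_natCast] at h ⊢
  rw [pvFixAt]
  rw [PySem.List.pyGet?_natCast]
  rw [List.getElem?_eq_getElem h]
  simp only [PySem.List.slice_to_natCast]
  have : ((n : Int) + 1) = (((n + 1 : Nat)) : Int) := by push_cast; ring
  rw [this, PySem.List.slice_from_natCast]
  rw [List.set_eq_take_append_cons_drop, if_pos h, pvFix]
  split <;> simp

theorem pvFixAtGuard_eq_set (xs : List Char) (i : Int) (h0 : 0 ≤ i) (h : i.toNat < xs.length) :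
    pvFixAtGuard xs i = xs.set i.toNat (pvFix (xs[i.toNat]'h)) := by
  rw [pvFixAtGuard, if_pos (by omega), pvFixAt_eq_set xs i h0 h]

-- a fold of per-index replacements over range(a, b) is one mapIdx with an interval condition
theorem pv_fold_fix (st : List Char → Int → List Char)
    (hst : ∀ ys (i : Int) (h0 : 0 ≤ i) (h : i.toNat < ys.length),
        st ys i = ys.set i.toNat (pvFix (ys[i.toNat]'h)))
    (xs : List Char) (a b : Int) (h0 : 0 ≤ a) (hb : b ≤ (xs.length : Int)) :
    (PySem.List.pyRange a b 1).foldl st xs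
      = xs.mapIdx (fun j c => if a ≤ (j : Int) ∧ (j : Int) < b then pvFix c else c) := by
  by_cases hab : a < b
  · rw [PySem.List.pyRange_one_cons hab, List.foldl_cons]
    have hlen : a.toNat < xs.length := by omega
    rw [hst xs a h0 hlen]
    have := pv_fold_fix st hst (xs.set a.toNat (pvFix (xs[a.toNat]'hlen))) (a+1) b
      (by omega) (by simpa using hb)
    rw [this]
    apply List.ext_getElem (by simp)
    intro j hj hj'
    simp only [List.getElem_mapIdx, List.getElem_set] at *
    split_ifs with hc1 hc2 hc2 <;> simp_all <;> omega
  · rw [PySem.List.pyRange_one_eq_nil (by omega), List.foldl_nil]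
    apply List.ext_getElem (by simp)
    intro j hj hj'
    simp only [List.getElem_mapIdx]
    rw [if_neg (by omega)]
termination_by (b - a).toNat
decreasing_by omega

-- B's map over enumerate is a mapIdx
theorem pv_enum_map (g : Int → Char → Char) (xs : List Char) (s : Int) :
    (PySem.List.enumerate xs s).map (fun p => g p.1 p.2)
      = xs.mapIdx (fun j c => g (s + (j : Int)) c) := by
  induction xs generalizing s with
  | nil => simp [PySem.List.enumerate_nil]
  | cons x xs ih =>
    rw [PySem.List.enumerate_cons, List.map_cons, List.mapIdx_cons, ih]
    simp only [Nat.cast_zero, add_zero]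
    congr 1
    apply List.ext_getElem (by simp)
    intro j hj hj'
    simp only [List.getElem_mapIdx]
    congr 1
    push_cast
    ring

-- ===== VERDICT (by name: the statement is the Claim_ definition above) =====
theorem clean_plate_text_py_spec : Claim_equal_clean_plate_text_py := by
  intro text _
  show clean_plate_text_py text = clean_plate_text_py_alt text
  by_cases ht : text = ""
  · subst ht; decide
  · rw [clean_plate_text_py, clean_plate_text_py_alt, if_neg ht]
    set cs := (PySem.Chars.upper text.toList).filter PySem.Chars.isalnum with hcs
    dsimp only
    by_cases h4 : 4 ≤ cs.length
    · rw [if_pos h4, if_neg (by omega)]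
      rw [pv_fold_fix pvFixAt pvFixAt_eq_set cs 0 (min 2 (cs.length:Int)) le_rfl (by omega)]
      rw [pv_fold_fix pvFixAtGuard pvFixAtGuard_eq_set _ _ _ (by omega) (by simp)]
      rw [pv_enum_map (fun i c => if i < 2 || max 2 ((cs.length:Int) - 3) ≤ i then pvCorrections.getD c c else c) cs 0]
      congr 1
      apply List.ext_getElem (by simp)
      intro j hj hj'
      simp only [List.getElem_mapIdx, List.length_mapIdx, zero_add]
      have hjn : j < cs.length := by simpa using hj'
      split_ifs <;> simp_all [pvFix_eq_getD] <;> omega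
    · rw [if_neg h4, if_pos (by omega)]
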